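-- pv_equiv track=rewrite | github.com/Broda/adventOfCode | 2022/day22.py | getBoundsOfCol
-- ===== SOURCE A (Python) =====
-- def getBoundsOfCol(grid, col):
--     bounds = [None,None]
--     for y in range(len(grid)):
--         if grid[y][col] == ' ':
--             if bounds[0] is None: continue
--             if bounds[1] is None:
--                 bounds[1] = y-1
--                 return bounds
--         elif bounds[0] is None:
--             bounds[0] = y
--
--     if bounds[1] is None: bounds[1] = len(grid)-1
--     return bounds
-- ===== SOURCE B (Python) =====
-- def getBoundsOfCol(grid, col):
--     column = ''.join(row[col] for row in grid)
--     stripped = column.lstrip(' ')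
--     if not stripped:
--         return [None, len(column) - 1]
--     start = len(column) - len(stripped)
--     end = column.find(' ', start)
--     return [start, (len(column) if end == -1 else end) - 1]
-- ===== Notes on version B (the rewrite author's own statement) =====
-- stated objective: alternative
-- what changed: Instead of A's single state-machine loop over a mutable [None,None] bounds list, B extracts the whole column as one string and computes the bounds with string primitives: lstrip(' ') gives the first non-space index, str.find(' ', start) gives the end of the run.
-- outside the precondition, e.g. on getBoundsOfCol(['x', ' ', ''], 0): A returns [0, 0], B raises IndexError
import Mathlib
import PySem

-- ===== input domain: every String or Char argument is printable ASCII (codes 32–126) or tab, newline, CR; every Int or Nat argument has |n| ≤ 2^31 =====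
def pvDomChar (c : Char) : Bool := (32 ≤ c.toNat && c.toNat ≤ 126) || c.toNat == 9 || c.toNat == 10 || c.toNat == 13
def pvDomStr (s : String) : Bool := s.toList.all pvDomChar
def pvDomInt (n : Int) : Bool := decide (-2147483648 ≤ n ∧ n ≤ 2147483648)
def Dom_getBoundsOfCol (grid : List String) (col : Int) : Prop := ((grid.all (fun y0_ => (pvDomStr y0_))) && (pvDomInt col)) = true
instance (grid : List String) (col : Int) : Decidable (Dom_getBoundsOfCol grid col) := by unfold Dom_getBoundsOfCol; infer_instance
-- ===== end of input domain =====

-- B replaces A's single state-machine loop over a mutable bounds pair with string primitives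
-- on the extracted column (lstrip + find); objective: alternative (same asymptotic cost).

-- ===== PORT A =====
-- A's single loop: y counter, mutable bounds = (b0, b1); 'grid[y][col]' via Str.pyGet?
-- (none = IndexError, excluded by Pre_; the port returns [none, none] there, a value never
-- claimed about).
def goA (col : Int) (b0 b1 : Option Int) (y : Int) (n : Int) : List String → List (Option Int)
  | [] => [b0, if b1 = none then some (n - 1) else b1]
  | r :: rs =>
    match PySem.Str.pyGet? r col with
    | none => [none, none]  -- IndexError; outside Pre_
    | some c =>
      if c = ' ' then
        if b0 = none then goA col b0 b1 (y + 1) n rs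
        else if b1 = none then [b0, some (y - 1)]
        else goA col b0 b1 (y + 1) n rs
      else
        if b0 = none then goA col (some y) b1 (y + 1) n rs
        else goA col b0 b1 (y + 1) n rs

def getBoundsOfCol (grid : List String) (col : Int) : List (Option Int) :=
  goA col none none 0 (grid.length : Int) grid

-- ===== PORT B =====
-- ''.join(row[col] for row in grid): the column as a char list; none = IndexError in the join
def colChars (col : Int) : List String → Option (List Char)
  | [] => some []
  | r :: rs =>
    match PySem.Str.pyGet? r col with
    | none => none  -- IndexError; outside Pre_
    | some c => (colChars col rs).map (fun cs => c :: cs)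

def getBoundsOfCol_alt (grid : List String) (col : Int) : List (Option Int) :=
  match colChars col grid with
  | none => [none, none]  -- IndexError; outside Pre_
  | some column =>
    -- column.lstrip(' '): exact — drops exactly the leading ' ' characters
    let stripped := column.dropWhile (fun c => c == ' ')
    if stripped.isEmpty then [none, some ((column.length : Int) - 1)]
    else
      let start : Int := (column.length : Int) - (stripped.length : Int)
      -- column.find(' ', start): exact here — 0 ≤ start ≤ len(column), so Python scans
      -- column[start:] and reports the absolute index of the first ' ', or -1 (none)
      match (column.drop (column.length - stripped.length)).findIdx? (fun c => c == ' ') with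
      | none => [some start, some ((column.length : Int) - 1)]
      | some j => [some start, some (start + (j : Int) - 1)]

-- ===== PRECONDITION & SPEC =====
-- Pre_ excludes grids with a row too short (or col too negative) for row[col]: B builds the
-- whole column eagerly and raises IndexError on any such grid, while A's lazy scan raises
-- only if it reaches the short row before its early return (see claim.json "cites" for one
-- excluded input where A returns and B raises).
def Pre_getBoundsOfCol (grid : List String) (col : Int) : Prop :=
  ∀ r ∈ grid, PySem.Raise.InRange r.toList.length col

instance (grid : List String) (col : Int) : Decidable (Pre_getBoundsOfCol grid col) := by
  unfold Pre_getBoundsOfCol; infer_instance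

def pvWitness_getBoundsOfCol : List String × Int := ([" x", " x", "  "], 1)

def Spec_getBoundsOfCol (grid : List String) (col : Int) (out : List (Option Int)) : Prop := out = getBoundsOfCol_alt grid col
instance (grid : List String) (col : Int) (out : List (Option Int)) : Decidable (Spec_getBoundsOfCol grid col out) := by unfold Spec_getBoundsOfCol; infer_instance

-- ===== CLAIM (what is proved, stated in full; the proofs are below) =====
def Claim_equal_getBoundsOfCol : Prop := ∀ (grid : List String) (col : Int), Dom_getBoundsOfCol grid col → Pre_getBoundsOfCol grid col → Spec_getBoundsOfCol grid col (getBoundsOfCol grid col)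

-- ===== LEMMAS AND PROOFS =====

-- proof-side views of A's two phases, as functions of the column characters
def aEnd (y n : Int) : List Char → Int
  | [] => n - 1
  | c :: cs => if c = ' ' then y - 1 else aEnd (y + 1) n cs

def aStart (y n : Int) : List Char → List (Option Int)
  | [] => [none, some (n - 1)]
  | c :: cs => if c = ' ' then aStart (y + 1) n cs else [some y, some (aEnd (y + 1) n cs)]

-- A's loop with bounds = [some s, None] computes aEnd of the remaining column
theorem goA_eq_aEnd (col : Int) (s y n : Int) (rows : List String) (cs : List Char)
    (h : colChars col rows = some cs) :
    goA col (some s) none y n rows = [some s, some (aEnd y n cs)] := by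
  induction rows generalizing y cs with
  | nil => simp [colChars] at h; subst h; simp [goA, aEnd]
  | cons r rs ih =>
    rcases hg : PySem.List.pyGet? r.toList col with _ | c
    · simp [colChars, PySem.Str.pyGet?, hg] at h
    · rcases hrest : colChars col rs with _ | cs'
      · simp [colChars, PySem.Str.pyGet?, hg, hrest] at h
      · have hcs : cs = c :: cs' := by
          simp [colChars, PySem.Str.pyGet?, hg, hrest] at h; exact h.symm
        subst hcs
        by_cases hsp : c = ' '
        · simp [goA, aEnd, PySem.Str.pyGet?, hg, hsp]
        · simp [goA, aEnd, PySem.Str.pyGet?, hg, hsp, ih _ _ hrest]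

-- A's loop with bounds = [None, None] computes aStart of the remaining column
theorem goA_eq_aStart (col : Int) (y n : Int) (rows : List String) (cs : List Char)
    (h : colChars col rows = some cs) :
    goA col none none y n rows = aStart y n cs := by
  induction rows generalizing y cs with
  | nil => simp [colChars] at h; subst h; simp [goA, aStart]
  | cons r rs ih =>
    rcases hg : PySem.List.pyGet? r.toList col with _ | c
    · simp [colChars, PySem.Str.pyGet?, hg] at h
    · rcases hrest : colChars col rs with _ | cs'
      · simp [colChars, PySem.Str.pyGet?, hg, hrest] at h
      · have hcs : cs = c :: cs' := by
          simp [colChars, PySem.Str.pyGet?, hg, hrest] at h; exact h.symm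
        subst hcs
        by_cases hsp : c = ' '
        · simp [goA, aStart, PySem.Str.pyGet?, hg, hsp, ih _ _ hrest]
        · simp [goA, aStart, PySem.Str.pyGet?, hg, hsp,
            goA_eq_aEnd col y (y + 1) n rs cs' hrest]

-- aEnd is the 'find the first space' formula
theorem aEnd_eq_find (y n : Int) (cs : List Char) :
    aEnd y n cs = (match cs.findIdx? (fun c => c == ' ') with
                   | none => n - 1
                   | some j => y + (j : Int) - 1) := by
  induction cs generalizing y with
  | nil => simp [aEnd]
  | cons c cs ih =>
    by_cases hsp : c = ' '
    · simp [aEnd, hsp, List.findIdx?_cons]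
    · simp only [aEnd, ih, List.findIdx?_cons, beq_iff_eq, if_neg hsp]
      rcases cs.findIdx? (fun c => c == ' ') with _ | j
      · simp
      · simp; ring

-- the tail of the column after its leading spaces is dropWhile
theorem drop_eq_dropWhile (cs : List Char) (p : Char → Bool) :
    cs.drop (cs.length - (cs.dropWhile p).length) = cs.dropWhile p := by
  have h2 : (cs.takeWhile p).length + (cs.dropWhile p).length = cs.length := by
    rw [← List.length_append, List.takeWhile_append_dropWhile]
  have hlen : cs.length - (cs.dropWhile p).length = (cs.takeWhile p).length := by omega
  rw [hlen]
  calc cs.drop (cs.takeWhile p).length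
      = ((cs.takeWhile p) ++ (cs.dropWhile p)).drop (cs.takeWhile p).length := by
        rw [List.takeWhile_append_dropWhile]
    _ = cs.dropWhile p := List.drop_left

-- aStart is B's lstrip/find formula
theorem aStart_eq_bform (y n : Int) (cs : List Char) :
    aStart y n cs =
      (if (cs.dropWhile (fun c => c == ' ')).isEmpty then [none, some (n - 1)]
       else
         match (cs.dropWhile (fun c => c == ' ')).findIdx? (fun c => c == ' ') with
         | none => [some (y + ((cs.length : Int) - ((cs.dropWhile (fun c => c == ' ')).length : Int))), some (n - 1)]
         | some j => [some (y + ((cs.length : Int) - ((cs.dropWhile (fun c => c == ' ')).length : Int))),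
             some (y + ((cs.length : Int) - ((cs.dropWhile (fun c => c == ' ')).length : Int)) + (j : Int) - 1)]) := by
  induction cs generalizing y with
  | nil => simp [aStart]
  | cons c cs ih =>
    by_cases hsp : c = ' '
    · subst hsp
      have hdw : (' ' :: cs).dropWhile (fun c => c == ' ') = cs.dropWhile (fun c => c == ' ') := by
        simp
      rw [show aStart y n (' ' :: cs) = aStart (y + 1) n cs from by simp [aStart], ih, hdw]
      rcases hE : (cs.dropWhile (fun c => c == ' ')).isEmpty with _ | _
      · have hle : (cs.dropWhile (fun c => c == ' ')).length ≤ cs.length :=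
          List.length_dropWhile_le _ _
        simp only [Bool.false_eq_true, if_false, List.length_cons]
        have harith : (y + 1) + ((cs.length : Int) - ((cs.dropWhile (fun c => c == ' ')).length : Int))
            = y + (((cs.length + 1 : Nat) : Int) - ((cs.dropWhile (fun c => c == ' ')).length : Int)) := by
          push_cast; ring
        rw [harith]
      · simp
    · have hdw : (c :: cs).dropWhile (fun c => c == ' ') = c :: cs := by
        simp [hsp]
      rw [show aStart y n (c :: cs) = [some y, some (aEnd (y + 1) n cs)] from by
          simp [aStart, hsp], hdw]
      simp only [List.isEmpty_cons, Bool.false_eq_true, if_false,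
        List.findIdx?_cons, beq_iff_eq, if_neg hsp, List.length_cons]
      have hst : y + (((cs.length + 1 : Nat) : Int) - ((cs.length + 1 : Nat) : Int)) = y := by
        push_cast; ring
      rw [aEnd_eq_find]
      rcases cs.findIdx? (fun c => c == ' ') with _ | j
      · simp
      · simp only [Option.map_some, hst]
        have : y + 1 + (j : Int) - 1 = y + ((j : Nat) + 1 : Nat) - 1 := by push_cast; ring
        simp [this]

-- Pre_ gives a successful column extraction
theorem colChars_some (col : Int) (rows : List String)
    (h : ∀ r ∈ rows, PySem.Raise.InRange r.toList.length col) :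
    ∃ cs, colChars col rows = some cs := by
  induction rows with
  | nil => exact ⟨[], rfl⟩
  | cons r rs ih =>
    have hr : PySem.Raise.InRange r.toList.length col := h r (by simp)
    obtain ⟨c, hc⟩ : ∃ c, PySem.List.pyGet? r.toList col = some c := by
      rcases hget : PySem.List.pyGet? r.toList col with _ | c
      · exact absurd hr (by simpa [PySem.List.pyGet?_eq_none_iff] using hget)
      · exact ⟨c, rfl⟩
    obtain ⟨cs, hcs⟩ := ih (fun r hm => h r (by simp [hm]))
    exact ⟨c :: cs, by simp [colChars, PySem.Str.pyGet?, hc, hcs]⟩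

-- the column has one character per row
theorem colChars_length (col : Int) (rows : List String) (cs : List Char)
    (h : colChars col rows = some cs) : cs.length = rows.length := by
  induction rows generalizing cs with
  | nil => simp [colChars] at h; subst h; rfl
  | cons r rs ih =>
    rcases hg : PySem.List.pyGet? r.toList col with _ | c
    · simp [colChars, PySem.Str.pyGet?, hg] at h
    · rcases hrest : colChars col rs with _ | cs'
      · simp [colChars, PySem.Str.pyGet?, hg, hrest] at h
      · have hcs : cs = c :: cs' := by
          simp [colChars, PySem.Str.pyGet?, hg, hrest] at h; exact h.symm
        subst hcs
        simp [ih _ hrest]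

-- ===== VERDICT (by name: the statement is the Claim_ definition above) =====
theorem getBoundsOfCol_spec : Claim_equal_getBoundsOfCol := by
  intro grid col _ hpre
  unfold Spec_getBoundsOfCol getBoundsOfCol getBoundsOfCol_alt
  obtain ⟨cs, hcs⟩ := colChars_some col grid hpre
  have hlen : cs.length = grid.length := colChars_length col grid cs hcs
  rw [hcs, goA_eq_aStart col 0 (grid.length : Int) grid cs hcs, aStart_eq_bform]
  simp only [drop_eq_dropWhile]
  simp only [hlen]
  rcases (cs.dropWhile (fun c => c == ' ')).isEmpty with _ | _ <;> simp
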